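-- pv_equiv track=rewrite | github.com/johBac97/mirex2025-musecoco | utils_midi/remi_utils_bak.py | split_song_remi_to_segments
-- ===== SOURCE A (Python) =====
-- def get_bar_idx_from_remi(remi_seq):
--     # Get the starting token of each bar
--     start_token_index_of_the_bar = 0
--     bar_id = 0
--     bar_indices = {}
--
--     # bars_token_positions[bar_id] = (start token index of this bar, start token index of next bar)
--     for idx, token in enumerate(remi_seq):
--         if token == "b-1":
--             start_token_index_of_next_bar = idx + 1
--             bar_indices[bar_id] = (
--                 start_token_index_of_the_bar,
--                 start_token_index_of_next_bar,
--             )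
--
--             # Go to the next bar
--             start_token_index_of_the_bar = start_token_index_of_next_bar
--             bar_id = bar_id + 1
--     return bar_indices
--
-- def split_song_remi_to_segments(remi_seq):
--     '''
--     Split the remi sequence of a song to a list of 2-bar segments
--     NOTE: An additional blank is insert in the beginning.
--     '''
--     t = ['b-1'] + remi_seq
--     ret = []
--     bar_indices = get_bar_idx_from_remi(t)
--     for cur_bar_id in range(len(bar_indices)-1):
--         bar1_start_idx, bar1_end_idx = bar_indices[cur_bar_id]
--         next_bar_id = cur_bar_id + 1
--         bar2_start_idx, bar2_end_idx = bar_indices[next_bar_id]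
--         ret.append(t[bar1_start_idx:bar2_end_idx])
--     return ret
-- ===== SOURCE B (Python) =====
-- def split_song_remi_to_segments(remi_seq):
--     '''
--     Split the remi sequence of a song to a list of 2-bar segments
--     NOTE: An additional blank is insert in the beginning.
--     '''
--     bars = []
--     cur = []
--     for tok in ['b-1'] + remi_seq:
--         cur.append(tok)
--         if tok == 'b-1':
--             bars.append(cur)
--             cur = []
--     # tokens after the last 'b-1' form no complete bar and are dropped
--     return [b1 + b2 for b1, b2 in zip(bars, bars[1:])]
-- ===== Notes on version B (the rewrite author's own statement) =====
-- stated objective: simpler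
-- what changed: Instead of building a dict of bar boundary indices and re-slicing the flat sequence, B splits the sequence once into per-bar token lists and concatenates each adjacent pair with zip.
import Mathlib
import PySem

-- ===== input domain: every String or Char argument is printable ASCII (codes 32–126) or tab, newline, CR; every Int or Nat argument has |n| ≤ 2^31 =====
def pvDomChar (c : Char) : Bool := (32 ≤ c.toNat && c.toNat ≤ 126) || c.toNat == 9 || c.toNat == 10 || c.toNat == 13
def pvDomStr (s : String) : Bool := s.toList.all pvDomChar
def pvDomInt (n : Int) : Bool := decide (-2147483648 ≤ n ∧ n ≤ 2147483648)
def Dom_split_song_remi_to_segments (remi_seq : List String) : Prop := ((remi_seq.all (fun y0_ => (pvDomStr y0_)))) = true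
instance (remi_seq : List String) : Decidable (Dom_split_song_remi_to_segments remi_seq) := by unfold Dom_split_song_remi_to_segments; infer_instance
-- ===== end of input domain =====

-- B replaces A's dict of bar-boundary indices + re-slicing by a single split into
-- per-bar token lists whose adjacent pairs are concatenated (same values, simpler decomposition).

-- ===== PORT A =====
-- port of get_bar_idx_from_remi: fold over enumerate with state (start, bar_id, dict)
def get_bar_idx_from_remi (remi_seq : List String) : PySem.Dict Int (Int × Int) :=
  let st := (PySem.List.enumerate remi_seq 0).foldl
    (fun (st : Int × Int × PySem.Dict Int (Int × Int)) p =>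
      if p.2 == "b-1" then
        let nxt := p.1 + 1
        (nxt, st.2.1 + 1, st.2.2.insert st.2.1 (st.1, nxt))
      else st)
    (0, 0, PySem.Dict.empty)
  st.2.2

def split_song_remi_to_segments (remi_seq : List String) : List (List String) :=
  let t := "b-1" :: remi_seq
  let d := get_bar_idx_from_remi t
  -- bar_indices[cur_bar_id]: keys 0..len-1 are always present (the loop runs over
  -- range(len(bar_indices)-1)), so Python's lookup cannot raise; ported as getD with a dummy default.
  (PySem.List.pyRange 0 ((PySem.Dict.size d : Int) - 1) 1).foldl
    (fun ret cur =>
      let p1 := d.getD cur (0, 0)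
      let p2 := d.getD (cur + 1) (0, 0)
      ret ++ [PySem.List.slice t (some p1.1) (some p2.2)])
    []

-- ===== PORT B =====
def split_song_remi_to_segments_alt (remi_seq : List String) : List (List String) :=
  let st := ("b-1" :: remi_seq).foldl
    (fun (st : List (List String) × List String) tok =>
      let cur := st.2 ++ [tok]
      if tok == "b-1" then (st.1 ++ [cur], []) else (st.1, cur))
    ([], [])
  let bars := st.1
  -- zip(bars, bars[1:]) with concatenation; bars[1:] is bars.drop 1
  List.zipWith (fun b1 b2 => b1 ++ b2) bars (bars.drop 1)

-- ===== PRECONDITION & SPEC =====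
def Spec_split_song_remi_to_segments (remi_seq : List String) (out : List (List String)) : Prop := out = split_song_remi_to_segments_alt remi_seq
instance (remi_seq : List String) (out : List (List String)) : Decidable (Spec_split_song_remi_to_segments remi_seq out) := by unfold Spec_split_song_remi_to_segments; infer_instance

-- ===== CLAIM (what is proved, stated in full; the proofs are below) =====
def Claim_equal_split_song_remi_to_segments : Prop := ∀ (remi_seq : List String), Dom_split_song_remi_to_segments remi_seq → Spec_split_song_remi_to_segments remi_seq (split_song_remi_to_segments remi_seq)

-- ===== LEMMAS AND PROOFS =====

-- B's bar splitter, accumulator removed (bars produced from pending bar `cur` and remaining input)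
def pvBars (cur : List String) : List String → List (List String)
  | [] => []
  | tok :: rest =>
      if tok = "b-1" then (cur ++ [tok]) :: pvBars [] rest
      else pvBars (cur ++ [tok]) rest

-- A's dict entries, written as a plain recursion over the token list
def pvEntries (idx start barId : Int) : List String → List (Int × (Int × Int))
  | [] => []
  | tok :: rest =>
      if tok = "b-1" then (barId, (start, idx + 1)) :: pvEntries (idx + 1) (idx + 1) (barId + 1) rest
      else pvEntries (idx + 1) start barId rest

-- the same entries computed from the bar list, with running key and offset
def pvEntriesOf (barId off : Int) : List (List String) → List (Int × (Int × Int))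
  | [] => []
  | b :: bs => (barId, (off, off + b.length)) :: pvEntriesOf (barId + 1) (off + b.length) bs

theorem pvB_foldl (l : List String) (bars : List (List String)) (cur : List String) :
    (l.foldl (fun (st : List (List String) × List String) tok =>
      let c := st.2 ++ [tok]
      if tok == "b-1" then (st.1 ++ [c], []) else (st.1, c)) (bars, cur)).1
      = bars ++ pvBars cur l := by
  induction l generalizing bars cur with
  | nil => simp [pvBars]
  | cons tok rest ih =>
      rw [List.foldl_cons]
      by_cases h : tok = "b-1"
      · subst h
        simp only [BEq.rfl, if_true]
        rw [ih]
        simp [pvBars]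
      · have hb : (tok == "b-1") = false := by simp [h]
        simp only [hb, Bool.false_eq_true, if_false]
        rw [ih]
        simp [pvBars, h]

theorem pvA_foldl (l : List String) (idx start barId : Int) (d : PySem.Dict Int (Int × Int))
    (h : ∀ k ∈ d.keys, k < barId) :
    ((PySem.List.enumerate l idx).foldl
      (fun (st : Int × Int × PySem.Dict Int (Int × Int)) p =>
        if p.2 == "b-1" then
          let nxt := p.1 + 1
          (nxt, st.2.1 + 1, st.2.2.insert st.2.1 (st.1, nxt))
        else st) (start, barId, d)).2.2
      = PySem.Dict.mk (d.items ++ pvEntries idx start barId l) := by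
  induction l generalizing idx start barId d with
  | nil => simp [PySem.List.enumerate_nil, pvEntries]
  | cons tok rest ih =>
      rw [PySem.List.enumerate_cons]
      by_cases htok : tok = "b-1"
      · have hnc : d.contains barId = false := by
          rw [PySem.Dict.contains_eq_decide_mem_keys]
          simp only [decide_eq_false_iff_not]
          intro hm; exact absurd (h _ hm) (by omega)
        have hkeys := PySem.Dict.keys_insert_of_not_contains d (k := barId) (start, idx + 1) hnc
        have hitems := PySem.Dict.items_insert_of_not_contains d (k := barId) (start, idx + 1) hnc
        simp only [List.foldl_cons, htok, BEq.rfl, if_true]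
        have hlt : ∀ k ∈ (d.insert barId (start, idx + 1)).keys, k < barId + 1 := by
          rw [hkeys]; intro k hk
          rcases List.mem_append.mp hk with hk | hk
          · have := h _ hk; omega
          · simp at hk; omega
        rw [ih _ _ _ _ hlt, hitems]
        simp [pvEntries]
      · simp only [List.foldl_cons]
        have : (tok == "b-1") = false := by simp [htok]
        rw [this]
        simp only [Bool.false_eq_true, if_false]
        rw [ih _ _ _ _ h]
        simp [pvEntries, htok]

theorem pvEntries_eq (l : List String) (cur : List String) (start barId : Int) :
    pvEntries (start + cur.length) start barId l = pvEntriesOf barId start (pvBars cur l) := by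
  induction l generalizing cur start barId with
  | nil => simp [pvEntries, pvBars, pvEntriesOf]
  | cons tok rest ih =>
      by_cases h : tok = "b-1"
      · simp only [pvEntries, pvBars, h, if_true, pvEntriesOf]
        have h0 := ih [] (start + ↑cur.length + 1) (barId + 1)
        simp only [List.length_nil, Nat.cast_zero, add_zero] at h0
        have hl : (((cur ++ ["b-1"]).length : Nat) : Int) = (cur.length : Int) + 1 := by
          simp
        rw [hl, ← add_assoc, h0]
      · simp only [pvEntries, pvBars, h, if_false]
        rw [← ih (cur ++ [tok]) start barId]
        congr 1
        simp only [List.length_append, List.length_cons, List.length_nil]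
        push_cast
        ring

theorem pvFlatten_prefix (l : List String) (cur : List String) :
    ∃ r, cur ++ l = (pvBars cur l).flatten ++ r := by
  induction l generalizing cur with
  | nil => exact ⟨cur, by simp [pvBars]⟩
  | cons tok rest ih =>
      by_cases h : tok = "b-1"
      · obtain ⟨r, hr⟩ := ih []
        exact ⟨r, by simp [pvBars, h]; simpa using hr⟩
      · obtain ⟨r, hr⟩ := ih (cur ++ [tok])
        exact ⟨r, by simp [pvBars, h]; simpa using hr⟩

theorem pvEntriesOf_length (B : List (List String)) (barId off : Int) :
    (pvEntriesOf barId off B).length = B.length := by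
  induction B generalizing barId off with
  | nil => rfl
  | cons b bs ih => simp [pvEntriesOf, ih]

theorem pvEntriesOf_getElem? (B : List (List String)) (j : Nat) (barId off : Int) (hj : j < B.length) :
    (pvEntriesOf barId off B)[j]? =
      some (barId + j, (off + ((B.take j).flatten.length : Int), off + ((B.take (j+1)).flatten.length : Int))) := by
  induction B generalizing j barId off with
  | nil => simp at hj
  | cons b bs ih =>
      cases j with
      | zero => simp [pvEntriesOf]
      | succ j =>
          simp only [pvEntriesOf, List.getElem?_cons_succ]
          rw [ih _ _ _ (by simpa using hj)]
          simp only [List.take_succ_cons, List.flatten_cons, List.length_append]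
          push_cast
          refine congrArg some ?_
          refine Prod.ext ?_ (Prod.ext ?_ ?_) <;> simp <;> ring

theorem pvGet?_entriesOf (B : List (List String)) (j : Nat) (barId off : Int) :
    (PySem.Dict.mk (pvEntriesOf barId off B)).get? (barId + j) = ((pvEntriesOf barId off B)[j]?).map (·.2) := by
  induction B generalizing j barId off with
  | nil => simp [pvEntriesOf, PySem.Dict.get?]
  | cons b bs ih =>
      simp only [pvEntriesOf]
      rw [PySem.Dict.get?_mk_cons]
      cases j with
      | zero => simp
      | succ j =>
          have hne : (barId == barId + ((j : Int) + 1)) = false := by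
            simp only [beq_eq_false_iff_ne, ne_eq]
            omega
          have harg : barId + ((j : Nat) + 1 : Nat) = (barId + 1) + (j : Nat) := by push_cast; ring
          rw [show ((barId == barId + (((j : Nat) + 1 : Nat) : Int))) = false by push_cast; exact_mod_cast hne]
          simp only [Bool.false_eq_true, if_false, List.getElem?_cons_succ]
          rw [harg, ih]

theorem pvZ (B : List (List String)) (r : List String) :
    (PySem.List.pyRange 0 ((B.length : Int) - 1) 1).map
      (fun cur =>
        PySem.List.slice (B.flatten ++ r)
          (some ((PySem.Dict.mk (pvEntriesOf 0 0 B)).getD cur (0, 0)).1)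
          (some ((PySem.Dict.mk (pvEntriesOf 0 0 B)).getD (cur + 1) (0, 0)).2))
    = List.zipWith (fun b1 b2 => b1 ++ b2) B (B.drop 1) := by
  rw [PySem.List.pyRange_one]
  have hn : ((B.length : Int) - 1 - 0).toNat = B.length - 1 := by omega
  rw [hn, List.map_map]
  apply List.ext_getElem
  · simp [List.length_zipWith]
  · intro i h1 h2
    simp only [List.getElem_map, List.getElem_range, Function.comp_apply, List.getElem_zipWith,
      List.getElem_drop]
    have h1i : (1 : Nat) + i = i + 1 := by omega
    simp only [h1i]
    have hi : i < B.length - 1 := by simpa using h1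
    have hi1 : i + 1 < B.length := by omega
    have hi0 : i < B.length := by omega
    -- evaluate the two dict lookups
    have g1 : (PySem.Dict.mk (pvEntriesOf 0 0 B)).getD ((0 : Int) + (i : Nat)) (0, 0)
        = (0 + ((B.take i).flatten.length : Int), 0 + ((B.take (i+1)).flatten.length : Int)) := by
      rw [PySem.Dict.getD_eq_get?_getD, pvGet?_entriesOf, pvEntriesOf_getElem? _ _ _ _ hi0]
      rfl
    have g2 : (PySem.Dict.mk (pvEntriesOf 0 0 B)).getD ((0 : Int) + (i : Nat) + 1) (0, 0)
        = (0 + ((B.take (i+1)).flatten.length : Int), 0 + ((B.take (i+2)).flatten.length : Int)) := by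
      have : ((0 : Int) + (i : Nat) + 1) = (0 : Int) + ((i + 1 : Nat) : Int) := by push_cast; ring
      rw [this, PySem.Dict.getD_eq_get?_getD, pvGet?_entriesOf, pvEntriesOf_getElem? _ _ _ _ hi1]
      rfl
    rw [g1, g2]
    simp only [zero_add]
    rw [PySem.List.slice_natCast]
    -- pure list computation
    set a := (B.take i).flatten.length with ha
    set b := (B.take (i + 2)).flatten.length with hb
    have hsplit : B.flatten = (B.take i).flatten ++ (B.drop i).flatten := by
      rw [← List.flatten_append, List.take_append_drop]
    have hdrop : B.drop i = B[i] :: B[i+1] :: B.drop (i + 2) := by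
      rw [List.drop_eq_getElem_cons hi0, List.drop_eq_getElem_cons (by simpa using hi1)]
    have e1 : B[i]?.toList = [B[i]] := by simp [List.getElem?_eq_getElem hi0]
    have e2 : B[i+1]?.toList = [B[i+1]] := by simp [List.getElem?_eq_getElem hi1]
    have hf1 : ∀ x : List String, ([x] : List (List String)).flatten = x := by simp
    have hb0 : (B.take (i+1)).flatten.length = a + B[i].length := by
      rw [List.take_add_one, e1, List.flatten_append, List.length_append, hf1, ha]
    have hblen : b = a + (B[i].length + B[i+1].length) := by
      rw [hb]
      show (B.take (i+1+1)).flatten.length = _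
      rw [List.take_add_one, e2, List.flatten_append, List.length_append, hb0, hf1]
      omega
    rw [hsplit, List.append_assoc, List.drop_left' rfl, hdrop]
    simp only [List.flatten_cons]
    rw [hblen, Nat.add_sub_cancel_left, ← List.append_assoc B[i] B[i+1],
      List.append_assoc (B[i] ++ B[i+1])]
    exact List.take_left' (List.length_append ..)


theorem split_song_remi_to_segments_spec' (remi_seq : List String) :
    split_song_remi_to_segments remi_seq = split_song_remi_to_segments_alt remi_seq := by
  unfold split_song_remi_to_segments split_song_remi_to_segments_alt get_bar_idx_from_remi
  dsimp only
  have hkeys0 : ∀ k ∈ (PySem.Dict.empty : PySem.Dict Int (Int × Int)).keys, k < 0 := by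
    simp [PySem.Dict.keys_empty]
  rw [pvA_foldl ("b-1" :: remi_seq) 0 0 0 PySem.Dict.empty hkeys0]
  rw [pvB_foldl ("b-1" :: remi_seq) [] []]
  have hE : pvEntries 0 0 0 ("b-1" :: remi_seq) = pvEntriesOf 0 0 (pvBars [] ("b-1" :: remi_seq)) := by
    have h := pvEntries_eq ("b-1" :: remi_seq) [] 0 0
    simpa using h
  have hitems : (PySem.Dict.empty : PySem.Dict Int (Int × Int)).items = [] := rfl
  rw [hitems, List.nil_append, hE, List.nil_append]
  set B := pvBars [] ("b-1" :: remi_seq) with hBdef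
  obtain ⟨r, hr⟩ := pvFlatten_prefix ("b-1" :: remi_seq) []
  rw [List.nil_append, ← hBdef] at hr
  have hsize : (PySem.Dict.mk (pvEntriesOf 0 0 B)).size = B.length := by
    show (pvEntriesOf 0 0 B).length = _
    exact pvEntriesOf_length _ _ _
  rw [hsize, PySem.List.foldl_append_singleton_eq_map, List.nil_append, hr]
  exact pvZ B r

-- ===== VERDICT (by name: the statement is the Claim_ definition above) =====
theorem split_song_remi_to_segments_spec : Claim_equal_split_song_remi_to_segments := by
  intro remi _
  exact split_song_remi_to_segments_spec' remi
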